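-- pv_equiv track=rewrite | github.com/Owluska/GST_AVERAGING | array_parsing.py | scan_n_complete
-- ===== SOURCE A (Python) =====
-- def scan_n_complete(arr, end_symbol='\n'):
--     asize=(len(arr))
--     new_arr=[]
--     skip = 0
--
--     for s,n in zip(arr,range(asize)):
--         if skip != 0:
--             skip=skip-1
--             continue
--         cr = s.find(end_symbol)
--         if cr >= 0:
--             new_arr.append(arr[n])
--             continue
--         else:
--             k=n+1
--             ts = s
--             while(k < (asize)):
--                 cr = arr[k].find(end_symbol)
--                 ts=ts+str(arr[k])
--                 k=k+1
--                 if cr >= 0: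
--                     new_arr.append(ts)
--                     skip=(k-n)-1
--                     break
--     return new_arr
-- ===== SOURCE B (Python) =====
-- def scan_n_complete(arr, end_symbol='\n'):
--     new_arr = []
--     buf = None
--     for s in arr:
--         complete = s.find(end_symbol) >= 0
--         if buf is None:
--             if complete:
--                 new_arr.append(s)
--             else:
--                 buf = s
--         else:
--             buf = buf + str(s)
--             if complete:
--                 new_arr.append(buf)
--                 buf = None
--     return new_arr
-- ===== Notes on version B (the rewrite author's own statement) =====
-- stated objective: faster
-- what changed: Replaces the index/skip bookkeeping with an inner look-ahead while-loop (which rescans the tail from every start of an unterminated run) by a single forward pass maintaining an optional accumulation buffer, so each element is examined once.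
import Mathlib
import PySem

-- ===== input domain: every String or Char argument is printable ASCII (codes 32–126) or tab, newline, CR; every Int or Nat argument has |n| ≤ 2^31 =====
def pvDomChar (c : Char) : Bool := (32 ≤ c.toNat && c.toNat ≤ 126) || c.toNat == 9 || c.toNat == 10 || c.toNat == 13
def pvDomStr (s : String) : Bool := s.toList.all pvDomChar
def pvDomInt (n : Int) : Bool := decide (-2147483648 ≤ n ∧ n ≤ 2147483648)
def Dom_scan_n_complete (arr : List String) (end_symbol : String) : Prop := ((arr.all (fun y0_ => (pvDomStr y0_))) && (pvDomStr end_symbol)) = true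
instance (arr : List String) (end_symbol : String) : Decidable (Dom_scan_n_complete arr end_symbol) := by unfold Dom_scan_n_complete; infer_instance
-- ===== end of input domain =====

-- B replaces A's index/skip bookkeeping and inner look-ahead while-loop by one
-- forward pass with an optional accumulation buffer (objective: simpler).

-- ===== PORT A =====
-- inner while(k < asize): cr = arr[k].find(end_symbol); ts = ts + arr[k]; k = k + 1; if cr >= 0: append/break
-- returns some (ts, k) on break, none when the while-loop runs off the end.
def scanWhile (arr : List String) (es : String) (k : Nat) (ts : String) : Option (String × Nat) :=
  if _h : k < arr.length then
    let cr := PySem.Str.find (arr.getD k "") es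
    let ts' := ts ++ arr.getD k ""
    if 0 ≤ cr then some (ts', k + 1) else scanWhile arr es (k + 1) ts'
  else none
termination_by arr.length - k

-- the for-loop over zip(arr, range(asize)): s = arr[n]; transcribed as recursion on the index n
-- with the skip counter and accumulator new_arr as state.
def scanLoop (arr : List String) (es : String) (n : Nat) (skip : Nat) (acc : List String) : List String :=
  if h : n < arr.length then
    if skip ≠ 0 then scanLoop arr es (n + 1) (skip - 1) acc
    else
      let s := arr.getD n ""
      let cr := PySem.Str.find s es
      if 0 ≤ cr then scanLoop arr es (n + 1) 0 (acc ++ [arr.getD n ""])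
      else
        match scanWhile arr es (n + 1) s with
        | some (ts, k) => scanLoop arr es (n + 1) ((k - n) - 1) (acc ++ [ts])
        | none => scanLoop arr es (n + 1) 0 acc
  else acc
termination_by arr.length - n

def scan_n_complete (arr : List String) (end_symbol : String) : List String :=
  scanLoop arr end_symbol 0 0 []

-- ===== PORT B =====
-- single pass: buf is the open (not yet terminated) group, acc the output
def bufLoop (es : String) (l : List String) (buf : Option String) (acc : List String) : List String :=
  match l with
  | [] => acc
  | s :: rest =>
    let complete := 0 ≤ PySem.Str.find s es
    match buf with
    | none => if complete then bufLoop es rest none (acc ++ [s]) else bufLoop es rest (some s) acc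
    | some b =>
      let t := b ++ s
      if complete then bufLoop es rest none (acc ++ [t]) else bufLoop es rest (some t) acc

def scan_n_complete_alt (arr : List String) (end_symbol : String) : List String :=
  bufLoop end_symbol arr none []

-- ===== PRECONDITION & SPEC =====
def Spec_scan_n_complete (arr : List String) (end_symbol : String) (out : List String) : Prop := out = scan_n_complete_alt arr end_symbol
instance (arr : List String) (end_symbol : String) (out : List String) : Decidable (Spec_scan_n_complete arr end_symbol out) := by unfold Spec_scan_n_complete; infer_instance

-- ===== CLAIM (what is proved, stated in full; the proofs are below) =====
def Claim_equal_scan_n_complete : Prop := ∀ (arr : List String) (end_symbol : String), Dom_scan_n_complete arr end_symbol → Spec_scan_n_complete arr end_symbol (scan_n_complete arr end_symbol)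

-- ===== LEMMAS AND PROOFS =====

theorem pv_getD_eq (arr : List String) (k : Nat) (h : k < arr.length) : arr.getD k "" = arr[k] := by
  rw [List.getD_eq_getElem?_getD, List.getElem?_eq_getElem h]; rfl

-- a positive skip just drops indices
theorem scanLoop_skip (arr : List String) (es : String) :
    ∀ (skip m : Nat) (acc : List String),
      scanLoop arr es m skip acc = scanLoop arr es (m + skip) 0 acc := by
  intro skip
  induction skip with
  | zero => intro m acc; rfl
  | succ s ih =>
    intro m acc
    rw [scanLoop]
    by_cases h : m < arr.length
    · rw [dif_pos h, if_pos (by omega), Nat.succ_sub_one, ih (m + 1) acc]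
      have e : m + 1 + s = m + (s + 1) := by omega
      rw [e]
    · rw [dif_neg h, scanLoop, dif_neg (by omega)]

-- if the while-loop runs off the end, no element of the remaining suffix is complete
theorem scanWhile_none (arr : List String) (es : String) :
    ∀ (d k : Nat), arr.length - k = d → ∀ (ts : String), scanWhile arr es k ts = none →
      ∀ x ∈ arr.drop k, ¬ (0 ≤ PySem.Str.find x es) := by
  intro d
  induction d using Nat.strong_induction_on with
  | _ d ih => ?_
  intro k hd ts hw x hx
  rw [scanWhile] at hw
  by_cases h : k < arr.length
  · rw [dif_pos h] at hw
    have hget := pv_getD_eq arr k h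
    rw [List.drop_eq_getElem_cons h] at hx
    by_cases hc : 0 ≤ PySem.Str.find (arr.getD k "") es
    · rw [if_pos hc] at hw; simp at hw
    · rw [if_neg hc] at hw
      rcases List.mem_cons.mp hx with hx | hx
      · subst hx; rwa [hget] at hc
      · exact fun hpos =>
          ih (arr.length - (k + 1)) (by omega) (k + 1) rfl _ hw x hx hpos
  · rw [List.drop_eq_nil_of_le (by omega)] at hx
    exact absurd hx (List.not_mem_nil)

-- if no element of l is complete, the buffer pass appends nothing
theorem bufLoop_none (es : String) :
    ∀ (l : List String), (∀ x ∈ l, ¬ (0 ≤ PySem.Str.find x es)) →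
      ∀ (buf : Option String) (acc : List String), bufLoop es l buf acc = acc := by
  intro l
  induction l with
  | nil => intro _ buf acc; cases buf <;> rfl
  | cons s rest ih =>
    intro h buf acc
    have hs : ¬ (0 ≤ PySem.Str.find s es) := h s (List.mem_cons_self ..)
    have hr := fun x hx => h x (List.mem_cons_of_mem _ hx)
    cases buf with
    | none => rw [bufLoop]; rw [if_neg hs]; exact ih hr _ _
    | some b => rw [bufLoop]; rw [if_neg hs]; exact ih hr _ _

-- a successful while-scan corresponds to the buffer pass flushing at k'
theorem scanWhile_some (arr : List String) (es : String) :
    ∀ (d k : Nat), arr.length - k = d → ∀ (ts t : String) (k' : Nat), scanWhile arr es k ts = some (t, k') →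
      k < k' ∧ k' ≤ arr.length ∧
      ∀ acc : List String, bufLoop es (arr.drop k) (some ts) acc = bufLoop es (arr.drop k') none (acc ++ [t]) := by
  intro d
  induction d using Nat.strong_induction_on with
  | _ d ih => ?_
  intro k hd ts t k' hw
  rw [scanWhile] at hw
  by_cases h : k < arr.length
  · rw [dif_pos h] at hw
    have hget := pv_getD_eq arr k h
    by_cases hc : 0 ≤ PySem.Str.find (arr.getD k "") es
    · rw [if_pos hc] at hw
      obtain ⟨ht, hk⟩ := Prod.mk.injEq .. ▸ Option.some.injEq .. ▸ hw
      refine ⟨by omega, by omega, ?_⟩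
      intro acc
      rw [List.drop_eq_getElem_cons h]
      have hc' : 0 ≤ PySem.Str.find arr[k] es := by rwa [hget] at hc
      rw [bufLoop]
      rw [if_pos hc', ← hk, ← ht, hget]
    · rw [if_neg hc] at hw
      obtain ⟨h1, h2, h3⟩ := ih (arr.length - (k + 1)) (by omega) (k + 1) rfl _ _ _ hw
      refine ⟨by omega, h2, ?_⟩
      intro acc
      rw [List.drop_eq_getElem_cons h]
      have hc' : ¬ 0 ≤ PySem.Str.find arr[k] es := by rwa [hget] at hc
      rw [bufLoop]
      rw [if_neg hc', ← hget, h3 acc]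
  · rw [dif_neg h] at hw; simp at hw

-- main invariant: from any index with skip = 0, A's loop equals B's pass on the suffix
theorem scanLoop_eq_bufLoop (arr : List String) (es : String) :
    ∀ (d n : Nat), arr.length - n = d → ∀ (acc : List String),
      scanLoop arr es n 0 acc = bufLoop es (arr.drop n) none acc := by
  intro d
  induction d using Nat.strong_induction_on with
  | _ d ih => ?_
  intro n hd acc
  rw [scanLoop]
  by_cases h : n < arr.length
  · rw [dif_pos h, if_neg (by simp)]
    have hget := pv_getD_eq arr n h
    rw [List.drop_eq_getElem_cons h]
    by_cases hc : 0 ≤ PySem.Str.find (arr.getD n "") es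
    · have hc' : 0 ≤ PySem.Str.find arr[n] es := by rwa [hget] at hc
      rw [if_pos hc, bufLoop]
      rw [if_pos hc', ih (arr.length - (n + 1)) (by omega) (n + 1) rfl, hget]
    · have hc' : ¬ 0 ≤ PySem.Str.find arr[n] es := by rwa [hget] at hc
      rw [if_neg hc, bufLoop]
      rw [if_neg hc']
      cases hw : scanWhile arr es (n + 1) (arr.getD n "") with
      | none =>
        rw [ih (arr.length - (n + 1)) (by omega) (n + 1) rfl]
        rw [hget] at hw
        rw [bufLoop_none es _ (scanWhile_none arr es _ (n + 1) rfl _ hw)]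
        rw [bufLoop_none es _ (scanWhile_none arr es _ (n + 1) rfl _ hw)]
      | some p =>
        obtain ⟨t, k⟩ := p
        obtain ⟨h1, h2, h3⟩ := scanWhile_some arr es _ (n + 1) rfl _ _ _ hw
        show scanLoop arr es (n + 1) (k - n - 1) (acc ++ [t]) = _
        rw [scanLoop_skip, ih (arr.length - (n + 1 + (k - n - 1))) (by omega) _ rfl]
        have hkk : n + 1 + (k - n - 1) = k := by omega
        rw [hkk, ← hget, h3 acc]
  · rw [dif_neg h, List.drop_eq_nil_of_le (by omega)]
    rfl

-- ===== VERDICT (by name: the statement is the Claim_ definition above) =====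
theorem scan_n_complete_spec : Claim_equal_scan_n_complete := by
  intro arr es _
  unfold Spec_scan_n_complete scan_n_complete scan_n_complete_alt
  simpa using scanLoop_eq_bufLoop arr es arr.length 0 rfl []
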